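-- pv_equiv track=rewrite | github.com/Matsumoto213/atcoder | To_Be_LightBlue/re_002.py | eight_divisor
-- ===== SOURCE A (Python) =====
-- def eight_divisor(n):
--     divosor = 0
--     for j in range(1,n + 1):
--         if n % j == 0:
--             divosor += 1
--
--     if divosor == 8:
--         return True
--
--     return False
-- ===== SOURCE B (Python) =====
-- def eight_divisor(n):
--     if n < 1:
--         return False
--     count = 0
--     i = 1
--     while i * i <= n:
--         if n % i == 0:
--             count += 1 if i * i == n else 2
--         i += 1
--     return count == 8
-- ===== Notes on version B (the rewrite author's own statement) =====
-- stated objective: faster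
-- what changed: Counts divisors by trial division up to sqrt(n), counting both members of each divisor pair at once (one at a perfect-square root), instead of scanning all numbers from one to n.
import Mathlib
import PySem

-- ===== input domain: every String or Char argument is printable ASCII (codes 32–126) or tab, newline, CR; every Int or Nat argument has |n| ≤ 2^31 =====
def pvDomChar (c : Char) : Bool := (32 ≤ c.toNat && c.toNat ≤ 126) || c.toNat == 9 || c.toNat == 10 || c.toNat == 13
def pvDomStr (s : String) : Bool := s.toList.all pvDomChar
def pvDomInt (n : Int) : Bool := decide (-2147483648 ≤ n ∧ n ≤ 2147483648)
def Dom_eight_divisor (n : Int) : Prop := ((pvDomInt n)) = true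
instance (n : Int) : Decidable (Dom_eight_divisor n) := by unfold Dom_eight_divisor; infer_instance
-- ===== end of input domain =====

-- B replaces A's scan of all of 1..n by trial division up to sqrt(n), counting divisor pairs (faster).

-- ===== PORT A =====
-- literal port of A: count j in range(1, n+1) with n % j == 0, then compare with 8
def eight_divisor (n : Int) : Bool :=
  let divosor : Int :=
    (PySem.List.pyRange 1 (n + 1)).foldl
      (fun acc j => if PySem.Int.mod n j = 0 then acc + 1 else acc) 0
  if divosor = 8 then true else false

-- ===== PORT B =====
-- the while loop of Source B, made total with fuel (fuel n.toNat+1 always outlasts the loop)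
def eightLoopB (n : Int) : Nat → Int → Int → Int
  | 0, _, count => count
  | fuel + 1, i, count =>
    if i * i ≤ n then
      eightLoopB n fuel (i + 1)
        (count + if PySem.Int.mod n i = 0 then (if i * i = n then 1 else 2) else 0)
    else count

def eight_divisor_alt (n : Int) : Bool :=
  if n < 1 then false
  else decide (eightLoopB n (n.toNat + 1) 1 0 = 8)

-- ===== PRECONDITION & SPEC =====
def Spec_eight_divisor (n : Int) (out : Bool) : Prop := out = eight_divisor_alt n
instance (n : Int) (out : Bool) : Decidable (Spec_eight_divisor n out) := by unfold Spec_eight_divisor; infer_instance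

-- ===== CLAIM (what is proved, stated in full; the proofs are below) =====
def Claim_equal_eight_divisor : Prop := ∀ (n : Int), Dom_eight_divisor n → Spec_eight_divisor n (eight_divisor n)

-- ===== LEMMAS AND PROOFS =====

-- weight of a candidate d in B's pair-count
def wB (m d : Nat) : Int := if d ∣ m then (if d * d = m then 1 else 2) else 0

-- divisor count of m over 1..m (what A computes)
def dcA (m : Nat) : Nat := ((Finset.Ico 1 (m + 1)).filter (· ∣ m)).card

lemma fold_A_eq (m : Nat) (hm : 1 ≤ m) :
    (PySem.List.pyRange 1 ((m : Int) + 1)).foldl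
      (fun acc j => if PySem.Int.mod (m : Int) j = 0 then acc + 1 else acc) 0
      = (dcA m : Int) := by
  rw [PySem.List.foldl_ite_add_one (fun j => PySem.Int.mod (m : Int) j = 0)]
  rw [PySem.List.pyRange_one, List.countP_map]
  have hcnt : (List.range ((m : Int) + 1 - 1).toNat).countP
      ((fun j => decide (PySem.Int.mod (m : Int) j = 0)) ∘ (fun k : Nat => (1 : Int) + k))
      = ((Finset.range m).filter (fun k => (k + 1) ∣ m)).card := by
    have hrange : ((m : Int) + 1 - 1).toNat = m := by omega
    rw [hrange]
    have hcast : ∀ k : Nat, ((1 : Int) + k) = ((k + 1 : Nat) : Int) := by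
      intro k; push_cast; ring
    have : ∀ k : Nat, ((fun j => decide (PySem.Int.mod (m : Int) j = 0)) ∘
        (fun k : Nat => (1 : Int) + k)) k = decide ((k + 1) ∣ m) := by
      intro k
      simp only [Function.comp]
      rw [decide_eq_decide, PySem.Int.mod_eq_zero_iff_dvd, hcast k,
        Int.natCast_dvd_natCast]
    rw [List.countP_congr (fun k _ => by rw [this k])]
    simp [Finset.filter, Finset.card, Finset.range, Multiset.range, List.countP_eq_length_filter]
  rw [hcnt]
  have hbij : ((Finset.range m).filter (fun k => (k + 1) ∣ m)).card = dcA m := by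
    unfold dcA
    apply Finset.card_nbij' (fun k => k + 1) (fun d => d - 1)
    · intro k hk
      simp only [Finset.coe_filter, Set.mem_setOf_eq, Finset.mem_range] at hk
      simp only [Finset.coe_filter, Set.mem_setOf_eq, Finset.mem_Ico]
      exact ⟨⟨by omega, by omega⟩, hk.2⟩
    · intro d hd
      simp only [Finset.coe_filter, Set.mem_setOf_eq, Finset.mem_Ico] at hd
      simp only [Finset.coe_filter, Set.mem_setOf_eq, Finset.mem_range]
      have h1 : 1 ≤ d := hd.1.1
      refine ⟨by omega, ?_⟩
      have : d - 1 + 1 = d := by omega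
      rw [this]; exact hd.2
    · intro k _; simp
    · intro d hd
      simp only [Finset.coe_filter, Set.mem_setOf_eq, Finset.mem_Ico] at hd
      show d - 1 + 1 = d
      omega
  rw [hbij]
  omega

-- Pairing d ↦ m/d: divisors above sqrt m correspond to non-square-root divisors below
lemma card_large_eq (m : Nat) (hm : 1 ≤ m) :
    (((Finset.Ico 1 (m + 1)).filter (· ∣ m)).filter (fun d => ¬ d ≤ Nat.sqrt m)).card
      = ((Finset.Ico 1 (Nat.sqrt m + 1)).filter (fun d => d ∣ m ∧ d * d ≠ m)).card := by
  have hm0 : m ≠ 0 := by omega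
  apply Finset.card_nbij' (fun d => m / d) (fun d => m / d)
  · intro d hd
    simp only [Finset.coe_filter, Set.mem_setOf_eq, Finset.mem_filter,
      Finset.mem_Ico, not_le] at hd ⊢
    obtain ⟨⟨⟨h1, h2⟩, hdvd⟩, hr⟩ := hd
    set e := m / d with he
    have hed : e * d = m := Nat.div_mul_cancel hdvd
    have hd0 : 0 < d := by omega
    have he0 : 0 < e := by
      rcases Nat.eq_zero_or_pos e with h | h
      · exfalso; rw [h] at hed; simp at hed; omega
      · exact h
    have hdd : m < d * d := by
      calc m < (Nat.sqrt m).succ * (Nat.sqrt m).succ := Nat.lt_succ_sqrt m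
        _ ≤ d * d := Nat.mul_le_mul (by omega) (by omega)
    have hlt : e < d := by nlinarith
    have hee : e * e ≤ m := by nlinarith
    have hne : e * e ≠ m := by
      intro hcontra
      have h1 : e * e = e * d := by omega
      have : e = d := Nat.eq_of_mul_eq_mul_left he0 h1
      omega
    have hle : e ≤ Nat.sqrt m := Nat.le_sqrt.mpr hee
    exact ⟨⟨by omega, by omega⟩, Nat.div_dvd_of_dvd hdvd, hne⟩
  · intro d hd
    simp only [Finset.coe_filter, Set.mem_setOf_eq, Finset.mem_filter,
      Finset.mem_Ico, not_le] at hd ⊢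
    obtain ⟨⟨h1, h2⟩, hdvd, hne⟩ := hd
    set e := m / d with he
    have hed : e * d = m := Nat.div_mul_cancel hdvd
    have hd0 : 0 < d := by omega
    have he0 : 0 < e := by
      rcases Nat.eq_zero_or_pos e with h | h
      · exfalso; rw [h] at hed; simp at hed; omega
      · exact h
    have hdd : d * d < m := by
      have : d * d ≤ m := Nat.le_sqrt.mp (by omega)
      omega
    have hlt : d < e := by nlinarith
    have hee : m < e * e := by nlinarith
    have hem : e ≤ m := Nat.le_of_dvd (by omega) (Nat.div_dvd_of_dvd hdvd)
    refine ⟨⟨⟨by omega, by omega⟩, Nat.div_dvd_of_dvd hdvd⟩, ?_⟩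
    by_contra hle
    have hsle : e ≤ Nat.sqrt m := by omega
    have : e * e ≤ m := Nat.le_sqrt.mp hsle
    omega
  · intro d hd
    simp only [Finset.coe_filter, Set.mem_setOf_eq, Finset.mem_filter, Finset.mem_Ico] at hd
    exact Nat.div_div_self hd.1.2 hm0
  · intro d hd
    simp only [Finset.coe_filter, Set.mem_setOf_eq, Finset.mem_Ico] at hd
    exact Nat.div_div_self hd.2.1 hm0

-- The pair-count sum equals the plain divisor count
lemma key_sum (m : Nat) (hm : 1 ≤ m) :
    (dcA m : Int) = ∑ d ∈ Finset.Ico 1 (Nat.sqrt m + 1), wB m d := by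
  have hsplit : ∀ d, wB m d =
      (if d ∣ m then (1 : Int) else 0) + (if d ∣ m ∧ d * d ≠ m then (1 : Int) else 0) := by
    intro d
    unfold wB
    by_cases h1 : d ∣ m <;> by_cases h2 : d * d = m <;> simp [h1, h2]
  rw [Finset.sum_congr rfl (fun d _ => hsplit d), Finset.sum_add_distrib]
  rw [Finset.sum_boole, Finset.sum_boole]
  have hsmall : ((Finset.Ico 1 (Nat.sqrt m + 1)).filter (fun d => d ∣ m)).card
      = (((Finset.Ico 1 (m + 1)).filter (· ∣ m)).filter (fun d => d ≤ Nat.sqrt m)).card := by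
    congr 1
    ext d
    simp only [Finset.mem_filter, Finset.mem_Ico]
    constructor
    · rintro ⟨⟨h1, h2⟩, h3⟩
      have : d ≤ m := Nat.le_of_dvd (by omega) h3
      exact ⟨⟨⟨h1, by omega⟩, h3⟩, by omega⟩
    · rintro ⟨⟨⟨h1, _⟩, h3⟩, h4⟩
      exact ⟨⟨h1, by omega⟩, h3⟩
  have hnat : dcA m
      = ((Finset.Ico 1 (Nat.sqrt m + 1)).filter (fun d => d ∣ m)).card
        + ((Finset.Ico 1 (Nat.sqrt m + 1)).filter (fun d => d ∣ m ∧ d * d ≠ m)).card := by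
    unfold dcA
    rw [hsmall, ← card_large_eq m hm]
    exact (Finset.card_filter_add_card_filter_not
      (s := (Finset.Ico 1 (m + 1)).filter (· ∣ m)) (fun d => d ≤ Nat.sqrt m)).symm
  rw [hnat]
  push_cast
  ring
-- B's loop computes the pair-count sum from i to sqrt(m)+1
lemma loopB_eq (m : Nat) :
    ∀ (fuel : Nat) (i : Nat), 1 ≤ i → Nat.sqrt m + 1 ≤ i + fuel → ∀ count : Int,
      eightLoopB (m : Int) fuel (i : Int) count
        = count + ∑ d ∈ Finset.Ico i (Nat.sqrt m + 1), wB m d := by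
  intro fuel
  induction fuel with
  | zero =>
    intro i hi hfuel count
    have : Finset.Ico i (Nat.sqrt m + 1) = ∅ := Finset.Ico_eq_empty (by omega)
    simp [eightLoopB, this]
  | succ fuel ih =>
    intro i hi hfuel count
    show (if (i : Int) * (i : Int) ≤ (m : Int) then _ else _) = _
    by_cases hle : i ≤ Nat.sqrt m
    · have hii : i * i ≤ m := Nat.le_sqrt.mp hle
      rw [if_pos (by exact_mod_cast hii)]
      have hip : ((i : Int) + 1) = ((i + 1 : Nat) : Int) := by push_cast; ring
      rw [hip, ih (i + 1) (by omega) (by omega)]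
      rw [Finset.sum_eq_sum_Ico_succ_bot (by omega : i < Nat.sqrt m + 1)]
      have hterm : (if PySem.Int.mod (m : Int) (i : Int) = 0
          then (if (i : Int) * (i : Int) = (m : Int) then (1 : Int) else 2) else 0) = wB m i := by
        unfold wB
        by_cases h1 : i ∣ m
        · have hmod : PySem.Int.mod (m : Int) (i : Int) = 0 :=
            (PySem.Int.mod_eq_zero_iff_dvd _ _).mpr (Int.natCast_dvd_natCast.mpr h1)
          rw [if_pos hmod, if_pos h1]
          by_cases h2 : i * i = m
          · rw [if_pos (by exact_mod_cast h2 : (i : Int) * (i : Int) = (m : Int)), if_pos h2]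
          · rw [if_neg (fun hc => h2 (by exact_mod_cast hc)), if_neg h2]
        · rw [if_neg (fun hc => h1 (Int.natCast_dvd_natCast.mp
            ((PySem.Int.mod_eq_zero_iff_dvd _ _).mp hc))), if_neg h1]
      rw [hterm]
      ring
    · have hgt : Nat.sqrt m < i := by omega
      have hii : m < i * i := by
        calc m < (Nat.sqrt m).succ * (Nat.sqrt m).succ := Nat.lt_succ_sqrt m
          _ ≤ i * i := Nat.mul_le_mul (by omega) (by omega)
      rw [if_neg (by exact_mod_cast not_le.mpr hii)]
      have : Finset.Ico i (Nat.sqrt m + 1) = ∅ := Finset.Ico_eq_empty (by omega)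
      simp [this]

-- ===== VERDICT (by name: the statement is the Claim_ definition above) =====
theorem eight_divisor_spec : Claim_equal_eight_divisor := by
  intro n _
  unfold Spec_eight_divisor eight_divisor eight_divisor_alt
  by_cases hn : n < 1
  · rw [if_pos hn]
    have : PySem.List.pyRange 1 (n + 1) = [] := PySem.List.pyRange_one_eq_nil (by omega)
    simp [this]
  · rw [if_neg hn]
    rw [not_lt] at hn
    obtain ⟨m, rfl⟩ : ∃ m : Nat, n = (m : Int) := ⟨n.toNat, by omega⟩
    have hm : 1 ≤ m := by exact_mod_cast hn
    have htoNat : ((m : Int)).toNat = m := by omega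
    rw [htoNat]
    have hfold := fold_A_eq m hm
    simp only [hfold]
    have hloop := loopB_eq m (m + 1) 1 (by omega)
      (by have := Nat.sqrt_le_self m; omega) 0
    have h1 : ((1 : Nat) : Int) = (1 : Int) := by norm_num
    rw [h1] at hloop
    rw [hloop, key_sum m hm]
    simp
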